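-- pv_equiv track=rewrite | github.com/Oxerlax/RangeLine | Logic/update.py | remove_distances
-- ===== SOURCE A (Python) =====
-- from collections import Counter
--
-- def remove_distances(current_distances, delete_distances):
--     """
--     Remove specific shot distances from a list of current distances.
--
--     Uses a counter to ensure only the specified number of matching distances
--     are removed (not all occurrences). Each distance in `delete_distances`
--     is removed once per count from `current_distances`, preserving order
--     for the remaining values.
--
--     Args:
--         current_distances (list[int]): The list of current recorded shot distances.
--         delete_distances (list[int]): The list of shot distances to remove.
--
--     Returns:
--         list[int]: A new list of distances with the specified values removed.
--     """
--
--     delete_map = Counter(delete_distances)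
--     new_distances = []
--
--     i = 0
--     while i < len(current_distances):
--         if not delete_map:
--             new_distances.extend(current_distances[i:])
--             break
--
--         if current_distances[i] in delete_map:
--             if delete_map[current_distances[i]] == 1:
--                 del delete_map[current_distances[i]]
--             else:
--                 delete_map[current_distances[i]] -= 1
--         else:
--             new_distances.append(current_distances[i])
--
--         i += 1
--
--     return new_distances
-- ===== SOURCE B (Python) =====
-- def remove_distances(current_distances, delete_distances):
--     """Re-implementation: copy the input and delete one first occurrence
--     per element of delete_distances with list.remove, preserving order."""
--     result = list(current_distances)
--     for d in delete_distances:
--         if d in result: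
--             result.remove(d)
--     return result
-- ===== Notes on version B (the rewrite author's own statement) =====
-- stated objective: simpler
-- what changed: B copies the list and loops over delete_distances with list.remove (first-occurrence deletion), instead of A's Counter map with a counted single pass over current_distances.
import Mathlib
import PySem

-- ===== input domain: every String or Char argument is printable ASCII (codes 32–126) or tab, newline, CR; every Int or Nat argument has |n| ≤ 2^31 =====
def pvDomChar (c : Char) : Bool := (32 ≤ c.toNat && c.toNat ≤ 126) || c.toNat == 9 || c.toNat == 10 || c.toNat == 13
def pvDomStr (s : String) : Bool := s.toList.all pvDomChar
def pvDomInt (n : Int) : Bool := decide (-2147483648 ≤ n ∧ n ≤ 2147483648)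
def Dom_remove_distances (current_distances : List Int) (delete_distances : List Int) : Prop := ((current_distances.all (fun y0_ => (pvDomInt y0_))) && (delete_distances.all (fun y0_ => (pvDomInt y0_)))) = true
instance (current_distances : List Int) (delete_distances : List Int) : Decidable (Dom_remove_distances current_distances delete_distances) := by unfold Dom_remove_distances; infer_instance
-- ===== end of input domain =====

-- B replaces A's Counter-indexed single pass by a plain copy-then-list.remove loop over
-- delete_distances (simpler, same return value; A does not mutate its arguments and neither does B).


-- ===== PORT A =====
-- the while loop over i with state delete_map; `new_distances.extend(current_distances[i:]); break`
-- is the `c.size = 0` branch returning the remaining suffix, appends become cons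
def pvLoopA : List Int → PySem.Dict Int Int → List Int
  | [], _ => []
  | x :: xs, c =>
    if c.size = 0 then x :: xs
    else if c.contains x then
      (if c.getD x 0 = 1 then pvLoopA xs (c.erase x)
       else pvLoopA xs (c.insert x (c.getD x 0 - 1)))
    else x :: pvLoopA xs c

def remove_distances (current_distances : List Int) (delete_distances : List Int) : List Int :=
  pvLoopA current_distances (PySem.Dict.counter delete_distances)

-- ===== PORT B =====
-- result = list(current); for d in deletes: if d in result: result.remove(d)
def remove_distances_alt (current_distances : List Int) (delete_distances : List Int) : List Int :=
  delete_distances.foldl (fun r d => if d ∈ r then r.erase d else r) current_distances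

-- ===== PRECONDITION & SPEC =====
def Spec_remove_distances (current_distances : List Int) (delete_distances : List Int) (out : List Int) : Prop := out = remove_distances_alt current_distances delete_distances
instance (current_distances : List Int) (delete_distances : List Int) (out : List Int) : Decidable (Spec_remove_distances current_distances delete_distances out) := by unfold Spec_remove_distances; infer_instance

-- ===== CLAIM (what is proved, stated in full; the proofs are below) =====
def Claim_equal_remove_distances : Prop := ∀ (current_distances : List Int) (delete_distances : List Int), Dom_remove_distances current_distances delete_distances → Spec_remove_distances current_distances delete_distances (remove_distances current_distances delete_distances)

-- ===== LEMMAS AND PROOFS =====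

-- the counter c holds exactly the multiset of the not-yet-performed deletions ds
def pvRep (c : PySem.Dict Int Int) (ds : List Int) : Prop :=
  (∀ v, c.getD v 0 = (ds.count v : Int)) ∧ (∀ v, c.contains v = true ↔ v ∈ ds)

-- facts about Dict.erase (the prelude states none)
theorem pvGet?_erase_self (d : PySem.Dict Int Int) (k : Int) : (d.erase k).get? k = none := by
  simp only [PySem.Dict.erase, PySem.Dict.get?, Option.map_eq_none_iff, List.find?_eq_none]
  intro p hmem
  rcases List.mem_filter.mp hmem with ⟨-, hne⟩
  simpa using hne

theorem pvGet?_erase_of_ne (d : PySem.Dict Int Int) (k k' : Int) (h : k' ≠ k) :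
    (d.erase k).get? k' = d.get? k' := by
  simp only [PySem.Dict.erase, PySem.Dict.get?]
  congr 1
  induction d.items with
  | nil => rfl
  | cons p t ih =>
    by_cases hk : p.1 = k
    · simp [hk, Ne.symm h, ih]
    · by_cases hk' : p.1 = k' <;> simp [hk, hk', h, ih]

theorem pvContains_erase (d : PySem.Dict Int Int) (k k' : Int) :
    (d.erase k).contains k' = if k' = k then false else d.contains k' := by
  rw [PySem.Dict.contains_eq_isSome_get?, PySem.Dict.contains_eq_isSome_get?]
  by_cases h : k' = k
  · simp [h, pvGet?_erase_self]
  · simp [h, pvGet?_erase_of_ne d k k' h]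

theorem pvGetD_erase (d : PySem.Dict Int Int) (k k' : Int) :
    (d.erase k).getD k' 0 = if k' = k then 0 else d.getD k' 0 := by
  by_cases h : k' = k
  · simp [h, PySem.Dict.getD_eq_get?_getD, pvGet?_erase_self]
  · simp [h, PySem.Dict.getD_eq_get?_getD, pvGet?_erase_of_ne d k k' h]

-- under pvRep, the dict is falsy exactly when no deletions remain
theorem pvRep_size_zero (c : PySem.Dict Int Int) (ds : List Int) (h : pvRep c ds) :
    c.size = 0 ↔ ds = [] := by
  constructor
  · intro hz
    rw [List.eq_nil_iff_forall_not_mem]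
    intro v hv
    have hc := (h.2 v).mpr hv
    have : c.items = [] := List.length_eq_zero_iff.mp hz
    simp [PySem.Dict.contains, this] at hc
  · intro hnil
    cases hitems : c.items with
    | nil => simp [PySem.Dict.size, hitems]
    | cons p t =>
      have hc : c.contains p.1 = true := by
        simp [PySem.Dict.contains, hitems]
      have := (h.2 p.1).mp hc
      simp [hnil] at this

theorem pvRep_counter (ds : List Int) : pvRep (PySem.Dict.counter ds) ds := by
  constructor
  · intro v; exact PySem.Dict.getD_counter ds v
  · intro v
    rw [PySem.Dict.contains_counter]
    simp

theorem pvRep_erase (c : PySem.Dict Int Int) (ds : List Int) (x : Int) (h : pvRep c ds)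
    (hx : x ∈ ds) (h1 : c.getD x 0 = 1) : pvRep (c.erase x) (ds.erase x) := by
  have hcount : ds.count x = 1 := by
    have := h.1 x; rw [h1] at this; exact_mod_cast this.symm
  constructor
  · intro v
    rw [pvGetD_erase]
    by_cases hv : v = x
    · subst hv
      simp [List.count_erase_self, hcount]
    · simp [hv, h.1 v, List.count_erase_of_ne hv]
  · intro v
    rw [pvContains_erase]
    by_cases hv : v = x
    · subst hv
      constructor
      · intro hfalse; simp at hfalse
      · intro hmem
        have h0 : (ds.erase v).count v = 0 := by rw [List.count_erase_self, hcount]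
        have := List.count_pos_iff.mpr hmem
        omega
    · simp only [hv, if_false]
      rw [h.2 v, List.mem_erase_of_ne hv]

theorem pvRep_dec (c : PySem.Dict Int Int) (ds : List Int) (x : Int) (h : pvRep c ds)
    (hx : x ∈ ds) (h1 : c.getD x 0 ≠ 1) :
    pvRep (c.insert x (c.getD x 0 - 1)) (ds.erase x) := by
  have hcx : c.getD x 0 = (ds.count x : Int) := h.1 x
  have hpos : 1 ≤ ds.count x := List.count_pos_iff.mpr hx
  have h2 : 2 ≤ ds.count x := by
    have hne : (ds.count x : Int) ≠ 1 := hcx ▸ h1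
    omega
  constructor
  · intro v
    rw [PySem.Dict.getD_insert]
    by_cases hv : v = x
    · subst hv
      rw [hcx, List.count_erase_self, Nat.cast_sub hpos]
      simp
    · simp [hv, h.1 v, List.count_erase_of_ne hv]
  · intro v
    rw [PySem.Dict.contains_insert]
    by_cases hv : v = x
    · subst hv
      simp only [BEq.rfl, Bool.true_or, true_iff]
      have : (ds.erase v).count v ≠ 0 := by rw [List.count_erase_self]; omega
      exact List.count_pos_iff.mp (by omega)
    · have : (v == x) = false := by simp [hv]
      rw [this, Bool.false_or, h.2 v, List.mem_erase_of_ne hv]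

-- B's loop leaves a non-deleted head in place …
theorem pvFoldl_not_mem (x : Int) (xs ds : List Int) (h : x ∉ ds) :
    ds.foldl (fun r d => if d ∈ r then r.erase d else r) (x :: xs)
      = x :: ds.foldl (fun r d => if d ∈ r then r.erase d else r) xs := by
  induction ds generalizing xs with
  | nil => rfl
  | cons d t ih =>
    have hdx : d ≠ x := fun he => h (by simp [he.symm])
    have hx : x ∉ t := fun hm => h (List.mem_cons_of_mem d hm)
    simp only [List.foldl_cons]
    by_cases hm : d ∈ xs
    · have : d ∈ x :: xs := List.mem_cons_of_mem x hm
      rw [if_pos this, if_pos hm, List.erase_cons_tail (by simp [Ne.symm hdx])]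
      exact ih (xs.erase d) hx
    · have : d ∉ x :: xs := by simp [hdx, hm]
      rw [if_neg this, if_neg hm]
      exact ih xs hx
-- … and consumes a to-be-deleted head together with its first deletion request
theorem pvFoldl_mem (x : Int) (xs ds : List Int) (h : x ∈ ds) :
    ds.foldl (fun r d => if d ∈ r then r.erase d else r) (x :: xs)
      = (ds.erase x).foldl (fun r d => if d ∈ r then r.erase d else r) xs := by
  induction ds generalizing xs with
  | nil => cases h
  | cons d t ih =>
    by_cases hdx : d = x
    · subst hdx
      simp [List.foldl_cons]
    · have hx : x ∈ t := by
        rcases List.mem_cons.mp h with he | hm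
        · exact absurd he.symm hdx
        · exact hm
      rw [List.erase_cons_tail (by simp [hdx])]
      simp only [List.foldl_cons]
      by_cases hm : d ∈ xs
      · have : d ∈ x :: xs := List.mem_cons_of_mem x hm
        rw [if_pos this, if_pos hm, List.erase_cons_tail (by simp [Ne.symm hdx])]
        exact ih (xs.erase d) hx
      · have : d ∉ x :: xs := by simp [hdx, hm]
        rw [if_neg this, if_neg hm]
        exact ih xs hx

theorem pvFoldl_nil (ds : List Int) :
    ds.foldl (fun r d => if d ∈ r then r.erase d else r) [] = [] := by
  induction ds with
  | nil => rfl
  | cons d t ih => simpa using ih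

-- the main invariant: A's loop on any counter representing ds computes B's fold over ds
theorem pvMain (xs : List Int) (ds : List Int) (c : PySem.Dict Int Int) (h : pvRep c ds) :
    pvLoopA xs c = ds.foldl (fun r d => if d ∈ r then r.erase d else r) xs := by
  induction xs generalizing ds c with
  | nil => rw [pvFoldl_nil]; rfl
  | cons x xs ih =>
    rw [pvLoopA]
    by_cases hz : c.size = 0
    · rw [if_pos hz, (pvRep_size_zero c ds h).mp hz]
      rfl
    · rw [if_neg hz]
      by_cases hc : c.contains x = true
      · have hx : x ∈ ds := (h.2 x).mp hc
        rw [if_pos hc, pvFoldl_mem x xs ds hx]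
        by_cases h1 : c.getD x 0 = 1
        · rw [if_pos h1]; exact ih (ds.erase x) _ (pvRep_erase c ds x h hx h1)
        · rw [if_neg h1]; exact ih (ds.erase x) _ (pvRep_dec c ds x h hx h1)
      · have hx : x ∉ ds := fun hm => hc ((h.2 x).mpr hm)
        rw [if_neg hc, pvFoldl_not_mem x xs ds hx]
        exact congrArg (x :: ·) (ih ds c h)

-- ===== VERDICT (by name: the statement is the Claim_ definition above) =====
theorem remove_distances_spec : Claim_equal_remove_distances := by
  intro cur ds _
  unfold Spec_remove_distances remove_distances remove_distances_alt
  exact pvMain cur ds (PySem.Dict.counter ds) (pvRep_counter ds)
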